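-- pv_equiv track=rewrite | github.com/charleamaoAGR/CRB_Weather_app | CRB_Weather_app/Project_Directory/packages/CRB_Functions.py | get_iterable_hours
-- ===== SOURCE A (Python) =====
-- THREE_HOUR_SWITCH = 36
--
-- LATEST_HOUR = 84
--
-- def get_iterable_hours(hour_hh):
--     hour_hh_int = int(hour_hh)
--     hour = hour_hh_int
--     iterables = []
--     while hour <= LATEST_HOUR + hour_hh_int:
--         iterables.append(hour)
--         if hour < THREE_HOUR_SWITCH + hour_hh_int:
--             hour += 1
--         else:
--             hour += 3
--     return iterables
-- ===== SOURCE B (Python) =====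
-- THREE_HOUR_SWITCH = 36
--
-- LATEST_HOUR = 84
--
-- def get_iterable_hours(hour_hh):
--     base = int(hour_hh)
--     return (list(range(base, base + THREE_HOUR_SWITCH))
--             + list(range(base + THREE_HOUR_SWITCH, base + LATEST_HOUR + 1, 3)))
-- ===== Notes on version B (the rewrite author's own statement) =====
-- stated objective: simpler
-- what changed: Replaced A's accumulator while-loop with a per-iteration step-size branch by two closed-form range() calls (step-1 prefix, step-3 tail) concatenated.
import Mathlib
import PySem

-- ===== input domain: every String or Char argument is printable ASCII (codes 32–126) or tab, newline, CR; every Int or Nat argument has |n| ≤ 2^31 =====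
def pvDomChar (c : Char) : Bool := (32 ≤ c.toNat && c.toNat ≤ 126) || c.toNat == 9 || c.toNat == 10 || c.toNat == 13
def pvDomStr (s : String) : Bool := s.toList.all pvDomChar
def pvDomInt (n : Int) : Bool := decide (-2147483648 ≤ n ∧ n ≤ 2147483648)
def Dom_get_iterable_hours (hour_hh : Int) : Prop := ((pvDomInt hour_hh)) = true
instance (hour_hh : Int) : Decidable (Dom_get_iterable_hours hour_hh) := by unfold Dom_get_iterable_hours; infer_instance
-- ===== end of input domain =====

-- B replaces A's while-loop with a per-step branch by two closed-form ranges (step 1, then step 3): simpler.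

-- ===== PORT A =====
-- the while-loop of A: append hour, then advance by 1 before the switch point, else by 3
def gihLoop (bound switch hour : Int) : List Int :=
  if hour ≤ bound then
    hour :: gihLoop bound switch (if hour < switch then hour + 1 else hour + 3)
  else []
termination_by (bound + 1 - hour).toNat
decreasing_by
  split <;> omega

def get_iterable_hours (hour_hh : Int) : List Int :=
  -- hour_hh_int = int(hour_hh) is the identity on an Int argument
  gihLoop (84 + hour_hh) (36 + hour_hh) hour_hh

-- ===== PORT B =====
def get_iterable_hours_alt (hour_hh : Int) : List Int :=
  PySem.List.pyRange hour_hh (hour_hh + 36) 1 ++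
    PySem.List.pyRange (hour_hh + 36) (hour_hh + 84 + 1) 3

-- ===== PRECONDITION & SPEC =====
def Spec_get_iterable_hours (hour_hh : Int) (out : List Int) : Prop := out = get_iterable_hours_alt hour_hh
instance (hour_hh : Int) (out : List Int) : Decidable (Spec_get_iterable_hours hour_hh out) := by unfold Spec_get_iterable_hours; infer_instance

-- ===== CLAIM (what is proved, stated in full; the proofs are below) =====
def Claim_equal_get_iterable_hours : Prop := ∀ (hour_hh : Int), Dom_get_iterable_hours hour_hh → Spec_get_iterable_hours hour_hh (get_iterable_hours hour_hh)

-- ===== LEMMAS AND PROOFS =====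

-- step-3 range unrolls one element while nonempty
theorem pyRange3_cons (a b : Int) (h : a < b) :
    PySem.List.pyRange a b 3 = a :: PySem.List.pyRange (a + 3) b 3 := by
  rw [PySem.List.pyRange_of_pos a b (by norm_num), PySem.List.pyRange_of_pos (a + 3) b (by norm_num)]
  rw [if_pos h]
  by_cases h2 : a + 3 < b
  · rw [if_pos h2]
    have hc : ((b - a + 3 - 1) / 3).toNat = ((b - (a + 3) + 3 - 1) / 3).toNat + 1 := by omega
    rw [hc, List.range_succ_eq_map, List.map_cons, List.map_map]
    refine congrArg₂ List.cons (by ring) (List.map_congr_left fun k _ => ?_)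
    simp only [Function.comp_apply]
    push_cast
    ring
  · rw [if_neg h2]
    have hc : ((b - a + 3 - 1) / 3).toNat = 1 := by omega
    rw [hc]
    simp

-- step-3 range is empty once past the stop
theorem pyRange3_nil (a b : Int) (h : b ≤ a) : PySem.List.pyRange a b 3 = [] := by
  rw [PySem.List.pyRange_of_pos a b (by norm_num), if_neg (by omega)]
  simp

-- phase 2 of A's loop (at or past the switch): it is exactly a step-3 range
theorem gihLoop_phase2 (bound switch hour : Int) (h : switch ≤ hour) :
    gihLoop bound switch hour = PySem.List.pyRange hour (bound + 1) 3 := by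
  by_cases hb : hour ≤ bound
  · rw [gihLoop, if_pos hb, if_neg (by omega)]
    rw [gihLoop_phase2 bound switch (hour + 3) (by omega)]
    rw [pyRange3_cons hour (bound + 1) (by omega)]
  · rw [gihLoop, if_neg hb, pyRange3_nil hour (bound + 1) (by omega)]
termination_by (bound + 1 - hour).toNat
decreasing_by omega

-- phase 1 of A's loop (before the switch): a step-1 range followed by phase 2
theorem gihLoop_phase1 (bound switch hour : Int) (h1 : hour ≤ switch) (h2 : switch ≤ bound) :
    gihLoop bound switch hour = PySem.List.pyRange hour switch 1 ++ gihLoop bound switch switch := by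
  by_cases he : hour < switch
  · rw [gihLoop, if_pos (by omega), if_pos he]
    rw [gihLoop_phase1 bound switch (hour + 1) (by omega) h2]
    rw [PySem.List.pyRange_one_cons he]
    rfl
  · have hes : hour = switch := by omega
    rw [hes, PySem.List.pyRange_one_eq_nil le_rfl, List.nil_append]
termination_by (switch - hour).toNat
decreasing_by omega

-- ===== VERDICT (by name: the statement is the Claim_ definition above) =====
theorem get_iterable_hours_spec : Claim_equal_get_iterable_hours := by
  intro h _
  unfold Spec_get_iterable_hours get_iterable_hours get_iterable_hours_alt
  rw [gihLoop_phase1 (84 + h) (36 + h) h (by omega) (by omega),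
      gihLoop_phase2 (84 + h) (36 + h) (36 + h) le_rfl,
      show (36 : Int) + h = h + 36 by ring, show (84 : Int) + h + 1 = h + 84 + 1 by ring]
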